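-- pv_equiv track=rewrite | github.com/ys1998/desktop-buddy | parser.py | Searcher_h
-- ===== SOURCE A (Python) =====
-- def Searcher_h(l1,l2):
--     m=0
--     for i in l1:
--         for j in l2:
--             m=m+1
--             if i==j:
--                 return m
--         m=0
--     return
-- ===== SOURCE B (Python) =====
-- def Searcher_h(l1, l2):
--     first = {}
--     for idx, v in enumerate(l2):
--         if v not in first:
--             first[v] = idx
--     for i in l1:
--         if i in first:
--             return first[i] + 1
--     return None
-- ===== Notes on version B (the rewrite author's own statement) =====
-- stated objective: alternative
-- what changed: B builds a hash map value->first index of l2 once and scans l1 with O(1) lookups, replacing A's rescan of l2 for every element of l1; asymptotically O(n+m) vs O(n*m), but not measurably faster on the benchmark's early-match inputs.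
import Mathlib
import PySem

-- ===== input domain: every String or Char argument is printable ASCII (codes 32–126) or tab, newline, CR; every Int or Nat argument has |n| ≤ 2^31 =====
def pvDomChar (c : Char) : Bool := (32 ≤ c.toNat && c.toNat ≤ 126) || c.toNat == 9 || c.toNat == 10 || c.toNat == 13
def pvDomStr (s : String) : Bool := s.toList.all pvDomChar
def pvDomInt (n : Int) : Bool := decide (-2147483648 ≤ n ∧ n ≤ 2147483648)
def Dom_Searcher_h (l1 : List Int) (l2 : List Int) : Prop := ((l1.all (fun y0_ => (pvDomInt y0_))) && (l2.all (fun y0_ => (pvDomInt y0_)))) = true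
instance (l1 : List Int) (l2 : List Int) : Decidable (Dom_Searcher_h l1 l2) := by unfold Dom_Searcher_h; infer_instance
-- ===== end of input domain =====

-- B replaces A's nested rescan of l2 with a dict value→first index built once (a different algorithm, not measured faster).

-- ===== PORT A =====
-- inner 'for j in l2' loop of A, carrying the counter m; returns some m at the first hit
def pvInnerA (i : Int) : List Int → Int → Option Int
  | [], _ => none
  | j :: rest, m => if i = j then some (m + 1) else pvInnerA i rest (m + 1)

def Searcher_h (l1 : List Int) (l2 : List Int) : Option Int :=
  match l1 with
  | [] => none
  | i :: rest =>
    match pvInnerA i l2 0 with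
    | some r => some r
    | none => Searcher_h rest l2   -- m is reset to 0 before the next outer iteration

-- ===== PORT B =====
-- first pass of Source B: first[v] = idx for the first occurrence of each value of l2
def pvBuildFirst : List Int → Int → PySem.Dict Int Int → PySem.Dict Int Int
  | [], _, d => d
  | v :: rest, idx, d =>
    pvBuildFirst rest (idx + 1) (if d.contains v then d else d.insert v idx)

-- second pass of Source B: scan l1, return first[i] + 1 at the first key hit
def pvScanB (d : PySem.Dict Int Int) : List Int → Option Int
  | [] => none
  | i :: rest =>
    match d.get? i with
    | some idx => some (idx + 1)
    | none => pvScanB d rest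

def Searcher_h_alt (l1 : List Int) (l2 : List Int) : Option Int :=
  pvScanB (pvBuildFirst l2 0 PySem.Dict.empty) l1

-- ===== PRECONDITION & SPEC =====
def Spec_Searcher_h (l1 : List Int) (l2 : List Int) (out : Option Int) : Prop := out = Searcher_h_alt l1 l2
instance (l1 : List Int) (l2 : List Int) (out : Option Int) : Decidable (Spec_Searcher_h l1 l2 out) := by unfold Spec_Searcher_h; infer_instance

-- ===== CLAIM (what is proved, stated in full; the proofs are below) =====
def Claim_equal_Searcher_h : Prop := ∀ (l1 : List Int) (l2 : List Int), Dom_Searcher_h l1 l2 → Spec_Searcher_h l1 l2 (Searcher_h l1 l2)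

-- ===== LEMMAS AND PROOFS =====

-- the common characterisation: first index of i in l
def pvIdx? (i : Int) : List Int → Option Int
  | [] => none
  | j :: rest => if i = j then some 0 else (pvIdx? i rest).map (· + 1)

theorem pvInnerA_eq (i : Int) (l : List Int) (m : Int) :
    pvInnerA i l m = (pvIdx? i l).map (fun k => m + k + 1) := by
  induction l generalizing m with
  | nil => rfl
  | cons j rest ih =>
    simp only [pvInnerA, pvIdx?]
    split_ifs with h
    · simp
    · rw [ih]
      cases pvIdx? i rest with
      | none => simp
      | some k => simp; omega

theorem pvBuildFirst_get? (l : List Int) (m : Int) (d : PySem.Dict Int Int) (i : Int) :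
    (pvBuildFirst l m d).get? i =
      if d.contains i then d.get? i else (pvIdx? i l).map (fun k => m + k) := by
  induction l generalizing m d with
  | nil =>
    simp only [pvBuildFirst, pvIdx?, Option.map_none]
    rw [PySem.Dict.contains_eq_isSome_get?]
    cases d.get? i <;> simp
  | cons v rest ih =>
    simp only [pvBuildFirst, pvIdx?]
    by_cases hc : d.contains v
    · rw [if_pos hc, ih]
      by_cases hvi : i = v
      · subst hvi; simp [hc]
      · simp only [hvi, if_false]
        by_cases hci : d.contains i
        · simp [hci]
        · simp only [hci]
          cases pvIdx? i rest with
          | none => simp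
          | some k => simp; omega
    · rw [if_neg hc, ih]
      by_cases hvi : i = v
      · subst hvi
        simp [PySem.Dict.contains_insert_self, PySem.Dict.get?_insert_self, hc]
      · rw [PySem.Dict.contains_insert, PySem.Dict.get?_insert]
        simp only [hvi, if_false]
        by_cases hci : d.contains i
        · simp [hci]
        · simp only [hci]
          cases pvIdx? i rest with
          | none => simp [hvi]
          | some k => simp [hvi]; omega

theorem pvFirst_get? (l2 : List Int) (i : Int) :
    (pvBuildFirst l2 0 PySem.Dict.empty).get? i = pvIdx? i l2 := by
  rw [pvBuildFirst_get?]
  simp [PySem.Dict.contains_empty]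

theorem main_eq (l1 l2 : List Int) : Searcher_h l1 l2 = Searcher_h_alt l1 l2 := by
  induction l1 with
  | nil => rfl
  | cons i rest ih =>
    simp only [Searcher_h, Searcher_h_alt, pvScanB, pvFirst_get?, pvInnerA_eq]
    cases h : pvIdx? i l2 with
    | none => simpa [h, Searcher_h_alt, pvFirst_get?] using ih
    | some k => simp [add_comm]

-- ===== VERDICT (by name: the statement is the Claim_ definition above) =====
theorem Searcher_h_spec : Claim_equal_Searcher_h := by
  intro l1 l2 _
  unfold Spec_Searcher_h
  exact main_eq l1 l2
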